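-- pv_equiv track=rewrite | github.com/dhelfrich/AdventOfCode2023 | Day18/day18.py | getAngles
-- ===== SOURCE A (Python) =====
-- def getAngles(directions):
--     angles = []
--     for t, d in enumerate(directions):
--         dPrev = directions[t - 1][0]
--         dCurr = d[0]
--         if (dPrev, dCurr) in [('U', 'R'), ('R', 'D'), ('D', 'L'), ('L', 'U')]:
--             angles.append(1) # 90 degree turn
--         elif (dPrev, dCurr) in [('U', 'L'), ('L', 'D'), ('D', 'R'), ('R', 'U')]:
--             angles.append(0)
--         else:
--             angles.append(-1)
--     return angles
-- ===== SOURCE B (Python) =====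
-- def getAngles(directions):
--     vec = {'U': (0, 1), 'R': (1, 0), 'D': (0, -1), 'L': (-1, 0)}
--     heads = [d[0] for d in directions]
--     out = []
--     for p, c in zip(heads[-1:] + heads[:-1], heads):
--         if p in vec and c in vec:
--             (px, py), (cx, cy) = vec[p], vec[c]
--             cross = px * cy - py * cx
--             out.append(1 if cross == -1 else (0 if cross == 1 else -1))
--         else:
--             out.append(-1)
--     return out
-- ===== Notes on version B (the rewrite author's own statement) =====
-- stated objective: alternative
-- what changed: Instead of classifying each index against hard-coded pair lists via t-1 indexing, B first extracts the direction strings, rotates them with slicing (heads[-1:]+heads[:-1]), zips the rotated list with the original, and classifies each pair geometrically by the 2D cross product of unit direction vectors (cross=-1 right turn, +1 left turn, 0 or unknown letter -> -1).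
import Mathlib
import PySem

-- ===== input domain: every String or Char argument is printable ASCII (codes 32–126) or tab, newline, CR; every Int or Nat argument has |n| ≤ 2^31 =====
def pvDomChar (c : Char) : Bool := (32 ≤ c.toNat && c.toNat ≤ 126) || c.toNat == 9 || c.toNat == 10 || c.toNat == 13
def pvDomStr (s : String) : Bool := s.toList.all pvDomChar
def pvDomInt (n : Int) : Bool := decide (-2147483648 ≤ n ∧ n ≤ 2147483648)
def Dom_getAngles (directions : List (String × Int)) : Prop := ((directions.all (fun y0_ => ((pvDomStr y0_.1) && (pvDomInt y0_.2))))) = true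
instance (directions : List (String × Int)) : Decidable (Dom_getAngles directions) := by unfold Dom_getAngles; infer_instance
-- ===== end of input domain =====

-- One honest line: B rotates the extracted direction strings by slicing, zips the
-- rotated list with the original, and classifies each pair by the 2D cross product
-- of unit direction vectors instead of A's hard-coded pair lists; objective: alternative.

-- ===== PORT A =====
-- d[0] indexes the TUPLE, so dPrev/dCurr are the whole direction strings;
-- directions[t-1] is always in range for t from enumerate (t-1 ∈ [-1, n-2]),
-- so A is total; the Option on dPrev only totalizes the list indexing.
def getAngles (directions : List (String × Int)) : List Int :=
  (PySem.List.enumerate directions).foldl (fun angles td =>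
    let dPrev : Option String := (PySem.List.pyGet? directions (td.1 - 1)).map (fun p => p.1)
    let dCurr : String := td.2.1
    if (dPrev, dCurr) ∈ [(some "U", "R"), (some "R", "D"), (some "D", "L"), (some "L", "U")] then
      angles ++ [(1 : Int)]
    else if (dPrev, dCurr) ∈ [(some "U", "L"), (some "L", "D"), (some "D", "R"), (some "R", "U")] then
      angles ++ [(0 : Int)]
    else
      angles ++ [(-1 : Int)]) []

-- ===== PORT B =====
def pvVec : PySem.Dict String (Int × Int) :=
  PySem.Dict.ofList [("U", (0, 1)), ("R", (1, 0)), ("D", (0, -1)), ("L", (-1, 0))]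

def getAngles_alt (directions : List (String × Int)) : List Int :=
  let heads := directions.map (fun d => d.1)
  let rotated := PySem.List.slice heads (some (-1)) none ++ PySem.List.slice heads none (some (-1))
  (rotated.zip heads).foldl (fun out pc =>
    match pvVec.get? pc.1, pvVec.get? pc.2 with
    | some p, some c =>
        let cross := p.1 * c.2 - p.2 * c.1
        out ++ [if cross = -1 then (1 : Int) else if cross = 1 then 0 else -1]
    | _, _ => out ++ [(-1 : Int)]) []

-- ===== PRECONDITION & SPEC =====
def Spec_getAngles (directions : List (String × Int)) (out : List Int) : Prop := out = getAngles_alt directions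
instance (directions : List (String × Int)) (out : List Int) : Decidable (Spec_getAngles directions out) := by unfold Spec_getAngles; infer_instance

-- ===== CLAIM (what is proved, stated in full; the proofs are below) =====
def Claim_equal_getAngles : Prop := ∀ (directions : List (String × Int)), Dom_getAngles directions → Spec_getAngles directions (getAngles directions)

-- ===== LEMMAS AND PROOFS =====

-- A's per-step value, as a function of the previous/current direction strings
def pvStepA (op : Option String) (c : String) : Int :=
  if (op, c) ∈ [(some "U", "R"), (some "R", "D"), (some "D", "L"), (some "L", "U")] then 1
  else if (op, c) ∈ [(some "U", "L"), (some "L", "D"), (some "D", "R"), (some "R", "U")] then 0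
  else -1

-- B's per-step value
def pvStepB (p c : String) : Int :=
  match pvVec.get? p, pvVec.get? c with
  | some v, some w =>
      if v.1 * w.2 - v.2 * w.1 = -1 then 1
      else if v.1 * w.2 - v.2 * w.1 = 1 then 0 else -1
  | _, _ => -1

lemma pvVec_get? (s : String) :
    pvVec.get? s = (if s = "U" then some ((0 : Int), (1 : Int)) else if s = "R" then some (1, 0)
      else if s = "D" then some (0, -1) else if s = "L" then some (-1, 0) else none) := by
  have h : pvVec = PySem.Dict.mk [("U", (0, 1)), ("R", (1, 0)), ("D", (0, -1)), ("L", (-1, 0))] := by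
    decide
  rw [h]
  simp only [PySem.Dict.get?_mk_cons]
  have e : ∀ a : String, (a == s) = decide (s = a) := by
    intro a
    by_cases hsa : s = a
    · simp [hsa]
    · simp [hsa, (Ne.symm hsa : a ≠ s)]
  simp only [e]
  split_ifs <;> simp_all [PySem.Dict.get?]

lemma pv_step_eq (p c : String) : pvStepA (some p) c = pvStepB p c := by
  unfold pvStepA pvStepB
  simp only [pvVec_get?]
  by_cases h1 : p = "U" <;> by_cases h2 : p = "R" <;> by_cases h3 : p = "D" <;> by_cases h4 : p = "L" <;>
    by_cases g1 : c = "U" <;> by_cases g2 : c = "R" <;> by_cases g3 : c = "D" <;> by_cases g4 : c = "L" <;>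
    subst_vars <;> simp_all [Prod.ext_iff]

-- ===== VERDICT (by name: the statement is the Claim_ definition above) =====
theorem getAngles_spec : Claim_equal_getAngles := by
  intro directions _
  unfold Spec_getAngles
  show getAngles directions = getAngles_alt directions
  simp only [getAngles, getAngles_alt, PySem.List.slice_from_neg_one, PySem.List.slice_to_neg_one]
  rw [show (fun (angles : List Int) (td : Int × (String × Int)) =>
      if ((PySem.List.pyGet? directions (td.1 - 1)).map (fun p => p.1), td.2.1)
          ∈ [(some "U", "R"), (some "R", "D"), (some "D", "L"), (some "L", "U")] then
        angles ++ [(1 : Int)]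
      else if ((PySem.List.pyGet? directions (td.1 - 1)).map (fun p => p.1), td.2.1)
          ∈ [(some "U", "L"), (some "L", "D"), (some "D", "R"), (some "R", "U")] then
        angles ++ [(0 : Int)]
      else angles ++ [(-1 : Int)])
      = (fun angles td => angles ++
          [pvStepA ((PySem.List.pyGet? directions (td.1 - 1)).map (fun p => p.1)) td.2.1]) from by
    funext angles td
    unfold pvStepA
    split_ifs <;> rfl]
  rw [show (fun (out : List Int) (pc : String × String) =>
      match pvVec.get? pc.1, pvVec.get? pc.2 with
      | some p, some c =>
          out ++ [if p.1 * c.2 - p.2 * c.1 = -1 then (1 : Int)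
                  else if p.1 * c.2 - p.2 * c.1 = 1 then 0 else -1]
      | _, _ => out ++ [(-1 : Int)]) = (fun out pc => out ++ [pvStepB pc.1 pc.2]) from by
    funext out pc
    unfold pvStepB
    cases pvVec.get? pc.1 <;> cases pvVec.get? pc.2 <;> rfl]
  rw [PySem.List.foldl_append_singleton_eq_map, PySem.List.foldl_append_singleton_eq_map]
  simp only [List.nil_append]
  apply List.ext_getElem?
  intro i
  by_cases hi : i < directions.length
  · rw [List.getElem?_map, List.getElem?_map, PySem.List.getElem?_enumerate,
      show ∀ (a b : List String), a.zip b = List.zipWith Prod.mk a b from fun _ _ => rfl,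
      List.getElem?_zipWith]
    simp only [List.length_map]
    rw [List.getElem?_eq_getElem hi]
    have hd1 : ((directions.map (fun d => d.1)).drop (directions.length - 1))[0]? =
        directions[directions.length - 1]?.map (fun d => d.1) := by
      rw [List.getElem?_drop, List.getElem?_map]
      simp
    rcases Nat.eq_zero_or_pos i with h0 | hpos
    · subst h0
      have hn : 0 < directions.length := hi
      rw [List.getElem?_append_left (by simp; omega)]
      rw [hd1, List.getElem?_eq_getElem (by omega : directions.length - 1 < directions.length)]
      have hp : PySem.List.pyGet? directions (-1 : Int) = some directions[directions.length - 1] := by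
        rw [PySem.List.pyGet?_neg_one,
          List.getLast?_eq_getElem?, List.getElem?_eq_getElem (by omega : directions.length - 1 < directions.length)]
      simp only [Option.map_some, List.getElem?_map, List.getElem?_eq_getElem hi]
      simp [hp, pv_step_eq]
    · have hlen1 : ((directions.map (fun d => d.1)).drop (directions.length - 1)).length = 1 := by
        simp; omega
      rw [List.getElem?_append_right (by simp only [List.length_drop, List.length_map]; omega)]
      rw [hlen1, List.getElem?_dropLast, List.getElem?_map]
      have hlt : i - 1 < (directions.map (fun d => d.1)).length - 1 := by simp; omega
      simp only [List.length_map] at hlt ⊢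
      rw [if_pos hlt]
      rw [List.getElem?_eq_getElem (by omega : i - 1 < directions.length)]
      have hp : PySem.List.pyGet? directions ((i : Int) - 1) = some directions[i - 1] := by
        rw [show ((i : Int) - 1) = ((i - 1 : Nat) : Int) by omega, PySem.List.pyGet?_natCast,
          List.getElem?_eq_getElem (by omega : i - 1 < directions.length)]
      simp only [Option.map_some, List.getElem?_map, List.getElem?_eq_getElem hi]
      simp [hp, pv_step_eq]
  · rw [List.getElem?_eq_none, List.getElem?_eq_none]
    · simp only [List.length_map, List.length_zip, List.length_append, List.length_drop,
        List.length_dropLast, List.length_map]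
      omega
    · simp only [List.length_map, PySem.List.length_enumerate]
      omega
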